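-- pv_equiv track=rewrite | github.com/mashikro/code-challenges | cake_order_checker.py | check_order_recursively
-- ===== SOURCE A (Python) =====
-- def check_order_recursively(take_out_orders, dine_in_orders, served_orders):
--
--
--     # Base case
--     if len(served_orders) == 0:
--         return True
--
--     if take_out_orders and served_orders[0] == take_out_orders[0]:
--         return check_order_recursively(take_out_orders[1:], dine_in_orders, served_orders[1:])
--
--     elif dine_in_orders and served_orders[0] == dine_in_orders[0]:
--         return check_order_recursively(take_out_orders, dine_in_orders[1:], served_orders[1:])
--
--     else:
--         return False
-- ===== SOURCE B (Python) =====
-- def check_order_recursively(take_out_orders, dine_in_orders, served_orders):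
--     i = 0
--     j = 0
--     for s in served_orders:
--         if i < len(take_out_orders) and s == take_out_orders[i]:
--             i += 1
--         elif j < len(dine_in_orders) and s == dine_in_orders[j]:
--             j += 1
--         else:
--             return False
--     return True
-- ===== Notes on version B (the rewrite author's own statement) =====
-- stated objective: faster
-- what changed: Replaced the recursion that allocates list slices at every step with a single iterative pass over served_orders advancing two index pointers into the other lists.
import Mathlib
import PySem

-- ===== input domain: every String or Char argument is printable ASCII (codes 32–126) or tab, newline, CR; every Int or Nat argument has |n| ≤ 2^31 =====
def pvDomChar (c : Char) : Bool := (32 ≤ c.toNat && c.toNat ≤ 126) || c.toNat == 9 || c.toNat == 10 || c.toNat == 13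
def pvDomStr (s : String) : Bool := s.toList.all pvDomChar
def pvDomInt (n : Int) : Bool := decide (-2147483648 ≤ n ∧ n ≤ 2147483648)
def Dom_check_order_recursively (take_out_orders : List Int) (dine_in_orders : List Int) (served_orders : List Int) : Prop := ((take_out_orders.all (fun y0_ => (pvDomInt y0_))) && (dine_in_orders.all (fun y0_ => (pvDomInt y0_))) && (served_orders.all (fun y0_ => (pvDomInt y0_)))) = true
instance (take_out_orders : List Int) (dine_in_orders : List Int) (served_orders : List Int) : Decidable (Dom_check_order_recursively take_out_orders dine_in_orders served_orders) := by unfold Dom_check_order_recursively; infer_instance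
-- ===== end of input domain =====

-- B replaces A's slice-allocating recursion with one iterative two-pointer pass (objective: faster).

-- ===== PORT A =====
-- Literal transliteration of A: recursion on the lists, branch order preserved
-- (Python truthiness 'take_out_orders and …' = nonemptiness; xs[1:] = tail, xs[0] = head).
def check_order_recursively (take_out_orders : List Int) (dine_in_orders : List Int) (served_orders : List Int) : Bool :=
  match served_orders with
  | [] => true
  | s0 :: srest =>
    match take_out_orders with
    | t0 :: trest =>
      if s0 = t0 then check_order_recursively trest dine_in_orders srest
      else
        match dine_in_orders with
        | d0 :: drest => if s0 = d0 then check_order_recursively take_out_orders drest srest else false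
        | [] => false
    | [] =>
      match dine_in_orders with
      | d0 :: drest => if s0 = d0 then check_order_recursively take_out_orders drest srest else false
      | [] => false
termination_by served_orders.length

-- ===== PORT B =====
-- B's for-loop over served_orders with index pointers i, j (early return False = stop with false).
def pvAltLoop (t d : List Int) (i j : Nat) : List Int → Bool
  | [] => true
  | s0 :: rest =>
    if i < t.length ∧ t.getD i 0 = s0 then pvAltLoop t d (i + 1) j rest
    else if j < d.length ∧ d.getD j 0 = s0 then pvAltLoop t d i (j + 1) rest
    else false

def check_order_recursively_alt (take_out_orders : List Int) (dine_in_orders : List Int) (served_orders : List Int) : Bool :=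
  pvAltLoop take_out_orders dine_in_orders 0 0 served_orders

-- ===== PRECONDITION & SPEC =====
def Spec_check_order_recursively (take_out_orders : List Int) (dine_in_orders : List Int) (served_orders : List Int) (out : Bool) : Prop := out = check_order_recursively_alt take_out_orders dine_in_orders served_orders
instance (take_out_orders : List Int) (dine_in_orders : List Int) (served_orders : List Int) (out : Bool) : Decidable (Spec_check_order_recursively take_out_orders dine_in_orders served_orders out) := by unfold Spec_check_order_recursively; infer_instance

-- ===== CLAIM (what is proved, stated in full; the proofs are below) =====
def Claim_equal_check_order_recursively : Prop := ∀ (take_out_orders : List Int) (dine_in_orders : List Int) (served_orders : List Int), Dom_check_order_recursively take_out_orders dine_in_orders served_orders → Spec_check_order_recursively take_out_orders dine_in_orders served_orders (check_order_recursively take_out_orders dine_in_orders served_orders)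

-- ===== LEMMAS AND PROOFS =====

-- One-step unfolding equations for the A port (its equation lemmas loop under simp).
theorem A_nil (t d : List Int) : check_order_recursively t d [] = true := by
  rw [check_order_recursively.eq_def]

theorem A_tcons_eq (t0 s0 : Int) (tr d sr : List Int) (h : s0 = t0) :
    check_order_recursively (t0 :: tr) d (s0 :: sr) = check_order_recursively tr d sr := by
  conv_lhs => rw [check_order_recursively.eq_def]
  simp [h]

theorem A_tcons_ne_dcons (t0 d0 s0 : Int) (tr dr sr : List Int) (h : ¬ s0 = t0) :
    check_order_recursively (t0 :: tr) (d0 :: dr) (s0 :: sr)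
      = if s0 = d0 then check_order_recursively (t0 :: tr) dr sr else false := by
  conv_lhs => rw [check_order_recursively.eq_def]
  simp [h]

theorem A_tcons_ne_dnil (t0 s0 : Int) (tr sr : List Int) (h : ¬ s0 = t0) :
    check_order_recursively (t0 :: tr) [] (s0 :: sr) = false := by
  conv_lhs => rw [check_order_recursively.eq_def]
  simp [h]

theorem A_tnil_dcons (d0 s0 : Int) (dr sr : List Int) :
    check_order_recursively [] (d0 :: dr) (s0 :: sr)
      = if s0 = d0 then check_order_recursively [] dr sr else false := by
  conv_lhs => rw [check_order_recursively.eq_def]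

theorem A_tnil_dnil (s0 : Int) (sr : List Int) :
    check_order_recursively [] [] (s0 :: sr) = false := by
  rw [check_order_recursively.eq_def]

-- B's loop at pointers (i, j) computes A on the suffixes dropped at i and j.
theorem pvAltLoop_eq_drop (s : List Int) : ∀ (t d : List Int) (i j : Nat),
    pvAltLoop t d i j s = check_order_recursively (t.drop i) (d.drop j) s := by
  induction s with
  | nil => intro t d i j; simp [pvAltLoop, A_nil]
  | cons s0 rest ih =>
    intro t d i j
    by_cases hi : i < t.length
    · have hdt : t.drop i = t[i] :: t.drop (i + 1) := List.drop_eq_getElem_cons hi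
      have hgt : t.getD i 0 = t[i] := by
        simp [List.getD, List.getElem?_eq_getElem hi]
      by_cases he : s0 = t[i]
      · rw [hdt, A_tcons_eq _ _ _ _ _ he]
        simp only [pvAltLoop, hgt]
        rw [if_pos ⟨hi, he.symm⟩, ih]
      · by_cases hj : j < d.length
        · have hdd : d.drop j = d[j] :: d.drop (j + 1) := List.drop_eq_getElem_cons hj
          have hgd : d.getD j 0 = d[j] := by
            simp [List.getD, List.getElem?_eq_getElem hj]
          rw [hdt, hdd, A_tcons_ne_dcons _ _ _ _ _ _ he]
          by_cases hed : s0 = d[j]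
          · simp only [pvAltLoop, hgt, hgd]
            rw [if_neg (by simp [he, Eq.comm]), if_pos ⟨hj, hed.symm⟩, if_pos hed]
            rw [ih, hdt]
          · simp only [pvAltLoop, hgt, hgd]
            rw [if_neg (by simp [he, Eq.comm]), if_neg (by simp [hed, Eq.comm]), if_neg hed]
        · have hdd : d.drop j = [] := List.drop_eq_nil_of_le (le_of_not_gt hj)
          rw [hdt, hdd, A_tcons_ne_dnil _ _ _ _ he]
          simp only [pvAltLoop, hgt]
          rw [if_neg (by simp [he, Eq.comm]), if_neg (by simp [hj])]
    · have hdt : t.drop i = [] := List.drop_eq_nil_of_le (le_of_not_gt hi)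
      by_cases hj : j < d.length
      · have hdd : d.drop j = d[j] :: d.drop (j + 1) := List.drop_eq_getElem_cons hj
        have hgd : d.getD j 0 = d[j] := by
          simp [List.getD, List.getElem?_eq_getElem hj]
        rw [hdt, hdd, A_tnil_dcons]
        by_cases hed : s0 = d[j]
        · simp only [pvAltLoop, hgd]
          rw [if_neg (by simp [hi]), if_pos ⟨hj, hed.symm⟩, if_pos hed, ih, hdt]
        · simp only [pvAltLoop, hgd]
          rw [if_neg (by simp [hi]), if_neg (by simp [hed, Eq.comm]), if_neg hed]
      · have hdd : d.drop j = [] := List.drop_eq_nil_of_le (le_of_not_gt hj)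
        rw [hdt, hdd, A_tnil_dnil]
        simp only [pvAltLoop]
        rw [if_neg (by simp [hi]), if_neg (by simp [hj])]

-- ===== VERDICT (by name: the statement is the Claim_ definition above) =====
theorem check_order_recursively_spec : Claim_equal_check_order_recursively := by
  intro t d s _
  unfold Spec_check_order_recursively check_order_recursively_alt
  rw [pvAltLoop_eq_drop s t d 0 0]
  simp
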